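-- pv_equiv track=rewrite | github.com/feebrth/EI_cluster_input_optimization | Simulation_final.py | stim_amplitudes
-- ===== SOURCE A (Python) =====
-- def stim_amplitudes(timepoints, direction, kernel, kernel_step):
--     """
--     Generates stimulus timepoints and amplitudes for each direction based on provided timepoints, directions, and kernel.
--
--     Inputs:
--         timepoints: List of time points when trials occur
--         direction: List of direction values for each trial
--         kernel: List of amplitude values to be applied for each trial
--         kernel_step: Time step in ms between each value in the kernel
--
--     Returns:
--         stim_dicts: A dictionary where each key is a unique direction, with corresponding stimulus times and amplitudes
--     """
--     stim_dicts = {}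
--     for dir_value in set(direction):
--         stim_times = []
--         stim_amps = []
--
--         for i, time in enumerate(timepoints):
--             if direction[i] == dir_value:
--                 for k in range(len(kernel)):
--                     stim_times.append(time + k * kernel_step)
--                 stim_times.append(time + len(kernel) * kernel_step)
--                 stim_amps.extend(kernel)
--                 stim_amps.append(0)
--
--         stim_dicts[dir_value] = {'stim_time': stim_times, 'stim_amps': stim_amps}
--
--     return stim_dicts
-- ===== SOURCE B (Python) =====
-- def stim_amplitudes(timepoints, direction, kernel, kernel_step):
--     # One pass over the trials, appending into per-direction lists;
--     # the per-trial time offsets and amplitude block are precomputed once.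
--     acc = {d: ([], []) for d in direction}
--     offsets = [k * kernel_step for k in range(len(kernel) + 1)]
--     amps_block = kernel + [0]
--     for i, t in enumerate(timepoints):
--         times, amps = acc[direction[i]]
--         times.extend(t + o for o in offsets)
--         amps.extend(amps_block)
--     return {d: {'stim_time': ts, 'stim_amps': am} for d, (ts, am) in acc.items()}
-- ===== Notes on version B (the rewrite author's own statement) =====
-- stated objective: alternative
-- what changed: Instead of re-scanning all trials once per distinct direction with an inner per-trial kernel loop, B makes a single pass over the trials appending a precomputed offset/amplitude block into per-direction lists held in a dict.
-- outside the precondition, e.g. on stim_amplitudes([0], [], [], 1): A returns {}, B raises IndexError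
import Mathlib
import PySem

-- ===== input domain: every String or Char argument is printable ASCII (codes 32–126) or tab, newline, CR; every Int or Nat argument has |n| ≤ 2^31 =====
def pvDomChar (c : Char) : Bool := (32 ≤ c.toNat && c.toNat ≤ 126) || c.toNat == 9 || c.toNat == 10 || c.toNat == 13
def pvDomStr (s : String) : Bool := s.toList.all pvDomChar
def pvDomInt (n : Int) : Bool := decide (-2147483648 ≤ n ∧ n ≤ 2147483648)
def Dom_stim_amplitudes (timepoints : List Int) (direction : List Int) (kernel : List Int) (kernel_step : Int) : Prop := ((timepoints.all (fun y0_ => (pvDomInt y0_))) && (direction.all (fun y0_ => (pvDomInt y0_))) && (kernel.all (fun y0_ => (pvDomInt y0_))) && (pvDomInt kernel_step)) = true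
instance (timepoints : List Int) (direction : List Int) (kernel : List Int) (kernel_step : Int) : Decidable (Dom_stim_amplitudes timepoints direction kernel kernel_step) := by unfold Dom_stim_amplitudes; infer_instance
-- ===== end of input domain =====

-- B replaces A's per-distinct-direction rescans of all trials by one pass over the trials
-- with a precomputed offset/amplitude block (objective: alternative single-pass grouping).

-- ===== PORT A =====
-- Python A iterates over set(direction); its hash order is not modelled — the port uses
-- first-occurrence order (dict outputs are compared ignoring order).
def stim_amplitudes (timepoints : List Int) (direction : List Int) (kernel : List Int) (kernel_step : Int) : List (Int × List (String × List Int)) :=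
  (PySem.Set.ofList direction).foldl (fun acc dv =>
    let st := (PySem.List.enumerate timepoints).foldl
      (fun (st : List Int × List Int) (p : Int × Int) =>
        if PySem.List.pyGetD direction p.1 0 == dv then
          (((PySem.List.pyRange 0 (kernel.length : Int)).foldl
              (fun ts k => ts ++ [p.2 + k * kernel_step]) st.1)
            ++ [p.2 + (kernel.length : Int) * kernel_step],
           st.2 ++ kernel ++ [0])
        else st) ([], [])
    acc ++ [(dv, [("stim_time", st.1), ("stim_amps", st.2)])]) []

-- ===== PORT B =====
def stim_amplitudes_alt (timepoints : List Int) (direction : List Int) (kernel : List Int) (kernel_step : Int) : List (Int × List (String × List Int)) :=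
  let acc0 : PySem.Dict Int (List Int × List Int) :=
    direction.foldl (fun d x => d.insert x ([], [])) PySem.Dict.empty
  let offsets := (PySem.List.pyRange 0 ((kernel.length : Int) + 1)).map (fun k => k * kernel_step)
  let ampsBlock := kernel ++ [0]
  let acc := (PySem.List.enumerate timepoints).foldl
    (fun d p => d.modify (PySem.List.pyGetD direction p.1 0) ([], [])
      (fun st => (st.1 ++ offsets.map (fun o => p.2 + o), st.2 ++ ampsBlock))) acc0
  acc.items.map (fun p => (p.1, [("stim_time", p.2.1), ("stim_amps", p.2.2)]))

-- ===== PRECONDITION & SPEC =====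
-- Pre_ requires a direction for every timepoint: beyond that, both programs index
-- direction[i] out of range and raise IndexError — except the corner of an empty direction
-- list with nonempty timepoints, excluded although A returns {} there, because B's single
-- pass itself raises IndexError on the first trial's missing direction (see claim cites).
def Pre_stim_amplitudes (timepoints : List Int) (direction : List Int) (kernel : List Int) (kernel_step : Int) : Prop :=
  timepoints.length ≤ direction.length
instance (timepoints : List Int) (direction : List Int) (kernel : List Int) (kernel_step : Int) : Decidable (Pre_stim_amplitudes timepoints direction kernel kernel_step) := by unfold Pre_stim_amplitudes; infer_instance
def pvWitness_stim_amplitudes : List Int × List Int × List Int × Int := ([1, 10], [2, 3], [4, 5], 2)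

def Spec_stim_amplitudes (timepoints : List Int) (direction : List Int) (kernel : List Int) (kernel_step : Int) (out : List (Int × List (String × List Int))) : Prop := out = stim_amplitudes_alt timepoints direction kernel kernel_step
instance (timepoints : List Int) (direction : List Int) (kernel : List Int) (kernel_step : Int) (out : List (Int × List (String × List Int))) : Decidable (Spec_stim_amplitudes timepoints direction kernel kernel_step out) := by unfold Spec_stim_amplitudes; infer_instance

-- ===== CLAIM (what is proved, stated in full; the proofs are below) =====
def Claim_equal_stim_amplitudes : Prop := ∀ (timepoints : List Int) (direction : List Int) (kernel : List Int) (kernel_step : Int), Dom_stim_amplitudes timepoints direction kernel kernel_step → Pre_stim_amplitudes timepoints direction kernel kernel_step → Spec_stim_amplitudes timepoints direction kernel kernel_step (stim_amplitudes timepoints direction kernel kernel_step)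

-- ===== LEMMAS AND PROOFS =====

-- the per-trial block of stimulus times A appends for one matching trial at time t
def pvTrial (kernel : List Int) (ks t : Int) : List Int :=
  (PySem.List.pyRange 0 (kernel.length : Int)).map (fun k => t + k * ks) ++ [t + (kernel.length : Int) * ks]

lemma pvOffsets_eq (kernel : List Int) (ks t : Int) :
    ((PySem.List.pyRange 0 ((kernel.length : Int) + 1)).map (fun k => k * ks)).map (fun o => t + o)
      = pvTrial kernel ks t := by
  rw [List.map_map, PySem.List.pyRange_one_succ_right (by positivity)]
  simp [pvTrial, Function.comp]

lemma pvZipify (tp dir : List Int) (h : tp.length ≤ dir.length) :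
    (PySem.List.enumerate tp).map (fun p => (p.2, PySem.List.pyGetD dir p.1 0)) = tp.zip dir := by
  apply List.ext_getElem
  · simp [PySem.List.length_enumerate]; omega
  · intro k h1 h2
    have hk : k < tp.length := by simpa [PySem.List.length_enumerate] using h1
    have hd : k < dir.length := lt_of_lt_of_le hk h
    simp [PySem.List.getElem_enumerate, List.getElem_zip, PySem.List.pyGetD_natCast,
      List.getD_eq_getElem?_getD, List.getElem?_eq_getElem hd]

lemma pvInnerA (l : List (Int × Int)) (dv ks : Int) (kernel : List Int) (st : List Int × List Int) :
    l.foldl (fun st q =>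
      if q.2 == dv then
        (((PySem.List.pyRange 0 (kernel.length : Int)).foldl
            (fun ts k => ts ++ [q.1 + k * ks]) st.1) ++ [q.1 + (kernel.length : Int) * ks],
         st.2 ++ kernel ++ [0])
      else st) st
    = (st.1 ++ (l.filter (fun q => q.2 == dv)).flatMap (fun q => pvTrial kernel ks q.1),
       st.2 ++ (l.filter (fun q => q.2 == dv)).flatMap (fun _ => kernel ++ [0])) := by
  induction l generalizing st with
  | nil => simp
  | cons q l ih =>
    rw [List.foldl_cons, List.filter_cons]
    by_cases h : (q.2 == dv) = true
    · rw [if_pos h, ih, if_pos h, PySem.List.foldl_append_singleton_eq_map]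
      simp [pvTrial, List.append_assoc]
    · rw [if_neg h, ih, if_neg h]

lemma pvInnerA_enum (tp dir : List Int) (h : tp.length ≤ dir.length) (dv ks : Int) (kernel : List Int) :
    (PySem.List.enumerate tp).foldl
      (fun (st : List Int × List Int) (p : Int × Int) =>
        if PySem.List.pyGetD dir p.1 0 == dv then
          (((PySem.List.pyRange 0 (kernel.length : Int)).foldl
              (fun ts k => ts ++ [p.2 + k * ks]) st.1) ++ [p.2 + (kernel.length : Int) * ks],
           st.2 ++ kernel ++ [0])
        else st) ([], [])
    = (((tp.zip dir).filter (fun q => q.2 == dv)).flatMap (fun q => pvTrial kernel ks q.1),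
       ((tp.zip dir).filter (fun q => q.2 == dv)).flatMap (fun _ => kernel ++ [0])) := by
  have e1 : (tp.zip dir).foldl
      (fun (st : List Int × List Int) (q : Int × Int) =>
        if q.2 == dv then
          (((PySem.List.pyRange 0 (kernel.length : Int)).foldl
              (fun ts k => ts ++ [q.1 + k * ks]) st.1) ++ [q.1 + (kernel.length : Int) * ks],
           st.2 ++ kernel ++ [0])
        else st) ([], [])
      = (PySem.List.enumerate tp).foldl
      (fun (st : List Int × List Int) (p : Int × Int) =>
        if PySem.List.pyGetD dir p.1 0 == dv then
          (((PySem.List.pyRange 0 (kernel.length : Int)).foldl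
              (fun ts k => ts ++ [p.2 + k * ks]) st.1) ++ [p.2 + (kernel.length : Int) * ks],
           st.2 ++ kernel ++ [0])
        else st) ([], []) := by
    rw [← pvZipify tp dir h, List.foldl_map]
  rw [← e1, pvInnerA]
  simp

lemma pvAcc0_getD (dir : List Int) (c : Int) :
    (dir.foldl (fun d x => d.insert x (([], []) : List Int × List Int)) PySem.Dict.empty).getD c ([], [])
      = ([], []) := by
  have key : ∀ d : PySem.Dict Int (List Int × List Int), d.getD c ([], []) = ([], []) →
      (dir.foldl (fun d x => d.insert x ([], [])) d).getD c ([], []) = ([], []) := by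
    induction dir with
    | nil => intro d hd; simpa
    | cons x l ih =>
      intro d hd
      simp only [List.foldl_cons]
      refine ih _ ?_
      rw [PySem.Dict.getD_insert]
      split <;> simp [hd]
  exact key _ (PySem.Dict.getD_empty c ([], []))

lemma pvB_getD (l : List (Int × Int)) (d : PySem.Dict Int (List Int × List Int)) (c : Int)
    (f : Int → List Int) (g : List Int) :
    (l.foldl (fun d p => d.modify p.2 ([], [])
        (fun st => (st.1 ++ f p.1, st.2 ++ g))) d).getD c ([], [])
    = ((d.getD c ([], [])).1 ++ (l.filter (fun q => q.2 == c)).flatMap (fun q => f q.1),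
       (d.getD c ([], [])).2 ++ (l.filter (fun q => q.2 == c)).flatMap (fun _ => g)) := by
  induction l generalizing d with
  | nil => simp
  | cons p l ih =>
    simp only [List.foldl_cons, List.filter_cons]
    rw [ih, PySem.Dict.getD_modify]
    by_cases h : c = p.2
    · have hb : (p.2 == c) = true := by simp [h]
      simp [h, List.append_assoc]
    · have hb : (p.2 == c) = false := beq_eq_false_iff_ne.mpr (Ne.symm h)
      simp [h, hb]

lemma pvUpdate_self (l : List Int) (s : PySem.Set Int) (h : ∀ x ∈ l, x ∈ s) :
    PySem.Set.update s l = s := by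
  induction l generalizing s with
  | nil => rfl
  | cons x l ih =>
    have : PySem.Set.update s (x :: l) = PySem.Set.update (PySem.Set.add s x) l := rfl
    rw [this, PySem.Set.add_of_mem (h x (List.mem_cons_self))]
    exact ih s (fun y hy => h y (List.mem_cons_of_mem _ hy))

-- ===== VERDICT (by name: the statement is the Claim_ definition above) =====
theorem stim_amplitudes_spec : Claim_equal_stim_amplitudes := by
  intro tp dir kernel ks _ hpre
  unfold Spec_stim_amplitudes
  have h : tp.length ≤ dir.length := hpre
  simp only [stim_amplitudes, stim_amplitudes_alt]
  rw [PySem.List.foldl_append_singleton_eq_map]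
  -- rewrite B's enumerate/pyGetD fold as a fold over the zipped trials
  have efold : (PySem.List.enumerate tp).foldl
      (fun (d : PySem.Dict Int (List Int × List Int)) p =>
        d.modify (PySem.List.pyGetD dir p.1 0) ([], [])
          (fun st => (st.1 ++ ((PySem.List.pyRange 0 ((kernel.length : Int) + 1)).map (fun k => k * ks)).map (fun o => p.2 + o),
                      st.2 ++ (kernel ++ [0]))))
      (dir.foldl (fun d x => d.insert x ([], [])) PySem.Dict.empty)
      = (tp.zip dir).foldl
      (fun (d : PySem.Dict Int (List Int × List Int)) q =>
        d.modify q.2 ([], [])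
          (fun st => (st.1 ++ ((PySem.List.pyRange 0 ((kernel.length : Int) + 1)).map (fun k => k * ks)).map (fun o => q.1 + o),
                      st.2 ++ (kernel ++ [0]))))
      (dir.foldl (fun d x => d.insert x ([], [])) PySem.Dict.empty) := by
    rw [← pvZipify tp dir h, List.foldl_map]
  rw [efold]
  have hnd0 : ((dir.foldl (fun d x => d.insert x ([], []))
      (PySem.Dict.empty : PySem.Dict Int (List Int × List Int)))).keys.Nodup :=
    PySem.Dict.nodup_keys_foldl_insert _ _ _ PySem.Dict.nodup_keys_empty
  have hnd : (((tp.zip dir).foldl (fun d p => d.modify p.2 ([], [])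
      (fun st => (st.1 ++ ((PySem.List.pyRange 0 ((kernel.length : Int) + 1)).map (fun k => k * ks)).map (fun o => p.1 + o),
                  st.2 ++ (kernel ++ [0]))))
      (dir.foldl (fun d x => d.insert x ([], []))
        (PySem.Dict.empty : PySem.Dict Int (List Int × List Int))))).keys.Nodup :=
    PySem.Dict.nodup_keys_foldl_modify_key _ _ _ _ _ hnd0
  rw [PySem.Dict.items_eq_map_keys _ hnd ([], [])]
  rw [PySem.Dict.keys_foldl_modify_key, PySem.Dict.keys_foldl_insert]
  have hks : PySem.Set.update
      (PySem.Set.update (PySem.Dict.empty : PySem.Dict Int (List Int × List Int)).keys dir)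
      ((tp.zip dir).map (fun p => p.2)) = PySem.Set.ofList dir := by
    have h1 : PySem.Set.update (PySem.Dict.empty : PySem.Dict Int (List Int × List Int)).keys dir
        = PySem.Set.ofList dir := rfl
    rw [h1]
    refine pvUpdate_self _ _ (fun x hx => ?_)
    rcases List.mem_map.mp hx with ⟨p, hp, rfl⟩
    exact (PySem.Set.mem_ofList dir p.2).mpr (List.of_mem_zip hp).2
  rw [hks, List.map_map]
  refine List.map_congr_left (fun dv hdv => ?_)
  simp only [Function.comp]
  rw [pvInnerA_enum tp dir h dv ks kernel,
    pvB_getD (tp.zip dir) _ dv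
      (fun t => ((PySem.List.pyRange 0 ((kernel.length : Int) + 1)).map (fun k => k * ks)).map (fun o => t + o))
      (kernel ++ [0]), pvAcc0_getD]
  simp only [List.nil_append]
  congr 2
  congr 1
  exact (List.flatMap_congr (fun (q : Int × Int) _ => pvOffsets_eq kernel ks q.1)).symm
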